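-- pv_equiv track=rewrite | github.com/MrBrantCode/unitest_baseline | mut_generate/mist_train_taco/taco_869/solution.py | find_stock_buy_sell_days
-- ===== SOURCE A (Python) =====
-- def find_stock_buy_sell_days(price, n):
--     if n < 2:
--         return []
--
--     start = 0
--     i = 1
--     ans = []
--
--     while i < n:
--         if price[i - 1] < price[i]:
--             i += 1
--         else:
--             if start != i - 1:
--                 ans.append((start, i - 1))
--             start = i
--             i += 1
--
--     if start != n - 1:
--         ans.append((start, n - 1))
--
--     return ans
-- ===== SOURCE B (Python) =====
-- def find_stock_buy_sell_days(price, n):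
--     # Stateless boundary detection: a buy day is a local valley that starts a strict rise,
--     # a sell day is a local peak that ends one; pair them up in order with zip.
--     if n < 2:
--         return []
--     buys = [i for i in range(n - 1)
--             if price[i] < price[i + 1] and (i == 0 or price[i - 1] >= price[i])]
--     sells = [i for i in range(1, n)
--              if price[i - 1] < price[i] and (i == n - 1 or price[i] >= price[i + 1])]
--     return list(zip(buys, sells))
-- ===== Notes on version B (the rewrite author's own statement) =====
-- stated objective: alternative
-- what changed: Replaces A's single stateful scan (carrying 'start' and appending as it goes) with stateless boundary detection: two independent comprehensions pick out buy days (valleys that start a strict rise) and sell days (peaks that end one), which are then paired with zip.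
import Mathlib
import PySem

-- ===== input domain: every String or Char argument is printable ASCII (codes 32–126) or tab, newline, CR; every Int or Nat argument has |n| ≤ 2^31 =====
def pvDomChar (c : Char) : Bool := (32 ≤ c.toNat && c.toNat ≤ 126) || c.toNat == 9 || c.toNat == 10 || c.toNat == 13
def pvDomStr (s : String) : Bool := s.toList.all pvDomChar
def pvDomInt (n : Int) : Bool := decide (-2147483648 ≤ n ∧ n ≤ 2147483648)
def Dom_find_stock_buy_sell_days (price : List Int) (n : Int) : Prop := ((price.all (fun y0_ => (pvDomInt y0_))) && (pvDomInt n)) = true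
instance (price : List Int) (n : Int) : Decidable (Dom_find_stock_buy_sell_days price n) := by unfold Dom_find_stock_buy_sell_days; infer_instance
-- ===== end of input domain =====

-- B replaces A's stateful scan by stateless boundary detection: two filtered ranges
-- (buy days = valleys starting a strict rise, sell days = peaks ending one) zipped in
-- order (different decomposition, same O(n) cost; objective: alternative).

-- termination measure fact, cited by name in the decreasing_by below
theorem pv_dec (n i : Int) (h : i < n) : (n - (i + 1)).toNat < (n - i).toNat := by omega

-- ===== PORT A =====
-- A's while loop over i with state (start, ans); price[i-1]/price[i] via pyGet?
-- (none = IndexError, excluded by Pre_; the loop then returns ans, a value never claimed about).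
def pvA_loop (price : List Int) (n start i : Int) (ans : List (Int × Int)) : List (Int × Int) :=
  if _h : i < n then
    match PySem.List.pyGet? price (i - 1), PySem.List.pyGet? price i with
    | some a, some b =>
        if a < b then pvA_loop price n start (i + 1) ans
        else pvA_loop price n i (i + 1)
              (if start ≠ i - 1 then ans ++ [(start, i - 1)] else ans)
    | _, _ => ans
  else
    if start ≠ n - 1 then ans ++ [(start, n - 1)] else ans
termination_by (n - i).toNat
decreasing_by all_goals exact pv_dec n i _h

def find_stock_buy_sell_days (price : List Int) (n : Int) : List (Int × Int) :=
  if n < 2 then [] else pvA_loop price n 0 1 []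

-- ===== PORT B =====
-- the two comprehension filters of Source B, named (out-of-range reads, excluded by Pre_, use getD 0)
def pvBuyP (price : List Int) (i : Int) : Bool :=
  decide ((PySem.List.pyGet? price i).getD 0 < (PySem.List.pyGet? price (i + 1)).getD 0) &&
  (i == 0 || decide ((PySem.List.pyGet? price i).getD 0 ≤ (PySem.List.pyGet? price (i - 1)).getD 0))

def pvSellP (price : List Int) (n : Int) (i : Int) : Bool :=
  decide ((PySem.List.pyGet? price (i - 1)).getD 0 < (PySem.List.pyGet? price i).getD 0) &&
  (i == n - 1 || decide ((PySem.List.pyGet? price (i + 1)).getD 0 ≤ (PySem.List.pyGet? price i).getD 0))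

def find_stock_buy_sell_days_alt (price : List Int) (n : Int) : List (Int × Int) :=
  if n < 2 then []
  else ((PySem.List.pyRange 0 (n - 1) 1).filter (pvBuyP price)).zip
       ((PySem.List.pyRange 1 n 1).filter (pvSellP price n))

-- ===== PRECONDITION & SPEC =====
-- A raises IndexError exactly when 2 ≤ n and n exceeds len(price); Pre_ excludes those inputs.
def Pre_find_stock_buy_sell_days (price : List Int) (n : Int) : Prop :=
  n < 2 ∨ n ≤ (price.length : Int)
instance (price : List Int) (n : Int) : Decidable (Pre_find_stock_buy_sell_days price n) := by
  unfold Pre_find_stock_buy_sell_days; infer_instance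

def pvWitness_find_stock_buy_sell_days : List Int × Int := ([1, 2, 1, 3], 4)

def Spec_find_stock_buy_sell_days (price : List Int) (n : Int) (out : List (Int × Int)) : Prop := out = find_stock_buy_sell_days_alt price n
instance (price : List Int) (n : Int) (out : List (Int × Int)) : Decidable (Spec_find_stock_buy_sell_days price n out) := by unfold Spec_find_stock_buy_sell_days; infer_instance

-- ===== CLAIM (what is proved, stated in full; the proofs are below) =====
def Claim_equal_find_stock_buy_sell_days : Prop := ∀ (price : List Int) (n : Int), Dom_find_stock_buy_sell_days price n → Pre_find_stock_buy_sell_days price n → Spec_find_stock_buy_sell_days price n (find_stock_buy_sell_days price n)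

-- ===== LEMMAS AND PROOFS =====

-- shorthand for the (total) element read used by B's predicates
def pvG (price : List Int) (j : Int) : Int := (PySem.List.pyGet? price j).getD 0

-- "price rises at j"
def pvR (price : List Int) (j : Int) : Prop := pvG price j < pvG price (j + 1)

-- B's filters, generalized to start the range anywhere (the induction variable)
def pvBuysFrom (price : List Int) (n a : Int) : List Int :=
  (PySem.List.pyRange a (n - 1) 1).filter (pvBuyP price)
def pvSellsFrom (price : List Int) (n a : Int) : List Int :=
  (PySem.List.pyRange a n 1).filter (pvSellP price n)

theorem pvBuyP_iff (price : List Int) (i : Int) :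
    pvBuyP price i = true ↔ pvR price i ∧ (i = 0 ∨ ¬ pvR price (i - 1)) := by
  simp only [pvBuyP, pvR, pvG, Bool.and_eq_true, Bool.or_eq_true, decide_eq_true_eq, beq_iff_eq]
  constructor
  · rintro ⟨h1, h2⟩
    refine ⟨h1, ?_⟩
    rcases h2 with h | h
    · exact Or.inl h
    · right; rw [show i - 1 + 1 = i by omega]; omega
  · rintro ⟨h1, h2⟩
    refine ⟨h1, ?_⟩
    rcases h2 with h | h
    · exact Or.inl h
    · right; rw [show i - 1 + 1 = i by omega] at h; omega

theorem pvSellP_iff (price : List Int) (n i : Int) :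
    pvSellP price n i = true ↔ pvR price (i - 1) ∧ (i = n - 1 ∨ ¬ pvR price i) := by
  simp only [pvSellP, pvR, pvG, Bool.and_eq_true, Bool.or_eq_true, decide_eq_true_eq, beq_iff_eq]
  rw [show i - 1 + 1 = i by omega]
  constructor
  · rintro ⟨h1, h2⟩
    refine ⟨h1, ?_⟩
    rcases h2 with h | h
    · exact Or.inl h
    · right; omega
  · rintro ⟨h1, h2⟩
    refine ⟨h1, ?_⟩
    rcases h2 with h | h
    · exact Or.inl h
    · right; omega

-- range-filter step lemmas
theorem pvFilt_nil (p : Int → Bool) (a b : Int) (h : b ≤ a) :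
    (PySem.List.pyRange a b 1).filter p = [] := by
  rw [PySem.List.pyRange_one_eq_nil h]; rfl

theorem pvFilt_cons (p : Int → Bool) (a b : Int) (h : a < b) (hp : p a = true) :
    (PySem.List.pyRange a b 1).filter p = a :: (PySem.List.pyRange (a + 1) b 1).filter p := by
  rw [PySem.List.pyRange_one_cons h, List.filter_cons_of_pos hp]

theorem pvFilt_skip (p : Int → Bool) (a b : Int) (h : a < b) (hp : p a = false) :
    (PySem.List.pyRange a b 1).filter p = (PySem.List.pyRange (a + 1) b 1).filter p := by
  rw [PySem.List.pyRange_one_cons h, List.filter_cons_of_neg (by simp [hp])]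

theorem pvGet_some (price : List Int) (j : Int) (h0 : 0 ≤ j) (h1 : j < (price.length : Int)) :
    PySem.List.pyGet? price j = some ((PySem.List.pyGet? price j).getD 0) := by
  have h := PySem.List.pyGet?_eq_some_getElem (xs := price) (i := j) h0 h1
  rw [h]; rfl

theorem pvBuyP_false (price : List Int) (i : Int)
    (h : ¬ (pvR price i ∧ (i = 0 ∨ ¬ pvR price (i - 1)))) : pvBuyP price i = false :=
  Bool.eq_false_iff.mpr (fun ht => h ((pvBuyP_iff price i).mp ht))

theorem pvSellP_false (price : List Int) (n i : Int)
    (h : ¬ (pvR price (i - 1) ∧ (i = n - 1 ∨ ¬ pvR price i))) : pvSellP price n i = false :=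
  Bool.eq_false_iff.mpr (fun ht => h ((pvSellP_iff price n i).mp ht))

-- loop exit at a fresh valley s = n-1: both sides are ans
theorem pvFresh_exit (price : List Int) (n s : Int) (ans : List (Int × Int)) (hs : s = n - 1) :
    pvA_loop price n s (s + 1) ans =
      ans ++ (pvBuysFrom price n s).zip (pvSellsFrom price n (s + 1)) := by
  rw [pvA_loop, dif_neg (by omega : ¬ (s + 1 < n)), if_neg (by omega : ¬ s ≠ n - 1)]
  simp only [pvBuysFrom]
  rw [pvFilt_nil (pvBuyP price) s (n - 1) (by omega)]
  simp

-- loop exit while climbing (i = n): both sides append (s, n-1)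
theorem pvClimb_exit (price : List Int) (n s : Int) (ans : List (Int × Int))
    (_h0 : 0 ≤ s) (h1 : s + 1 < n)
    (hrise : ∀ j, s ≤ j → j ≤ n - 2 → pvR price j) :
    pvA_loop price n s n ans =
      ans ++ ((s :: pvBuysFrom price n (n - 1)).zip (pvSellsFrom price n (n - 1))) := by
  rw [pvA_loop, dif_neg (by omega : ¬ (n < n)), if_pos (by omega : s ≠ n - 1)]
  simp only [pvBuysFrom]
  rw [pvFilt_nil (pvBuyP price) (n - 1) (n - 1) (by omega)]
  simp only [pvSellsFrom]
  rw [pvFilt_cons (pvSellP price n) (n - 1) n (by omega)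
    ((pvSellP_iff price n (n - 1)).mpr ⟨by
        have := hrise (n - 2) (by omega) (by omega)
        rw [show n - 1 - 1 = n - 2 by omega]; exact this, Or.inl rfl⟩)]
  rw [pvFilt_nil (pvSellP price n) (n - 1 + 1) n (by omega)]
  simp

-- Joint invariant. Part 1 (fresh valley): A's state (start = s, i = s+1) where s is 0 or
-- follows a non-rise equals ans ++ zip of B's filters restarted at s / s+1.
-- Part 2 (climbing): A's state (start = s, i) with a strict rise throughout [s, i-2]
-- equals ans ++ zip of (s consed onto buys from i-1) with sells from i-1.
theorem pvMain (price : List Int) (n : Int) (hlen : n ≤ (price.length : Int)) (k : Nat) :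
    (∀ s ans, 0 ≤ s → s ≤ n - 1 → (s = 0 ∨ ¬ pvR price (s - 1)) → (n - (s + 1)).toNat ≤ k →
       pvA_loop price n s (s + 1) ans =
         ans ++ (pvBuysFrom price n s).zip (pvSellsFrom price n (s + 1))) ∧
    (∀ s i ans, 0 ≤ s → s + 1 < i → i ≤ n → (s = 0 ∨ ¬ pvR price (s - 1)) →
       (∀ j, s ≤ j → j ≤ i - 2 → pvR price j) → (n - i).toNat ≤ k →
       pvA_loop price n s i ans =
         ans ++ ((s :: pvBuysFrom price n (i - 1)).zip (pvSellsFrom price n (i - 1)))) := by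
  induction k with
  | zero =>
    constructor
    · intro s ans h0 h1 hfresh hk
      exact pvFresh_exit price n s ans (by omega)
    · intro s i ans h0 h1 h2 hfresh hrise hk
      have hi : i = n := by omega
      rw [hi]
      exact pvClimb_exit price n s ans h0 (by omega) (fun j hj1 hj2 => hrise j hj1 (by omega))
  | succ k ih =>
    constructor
    · -- FRESH state
      intro s ans h0 h1 hfresh hk
      by_cases hend : s + 1 < n
      · have ga : PySem.List.pyGet? price s = some ((PySem.List.pyGet? price s).getD 0) :=
          pvGet_some price s (by omega) (by omega)
        have gb : PySem.List.pyGet? price (s + 1) = some ((PySem.List.pyGet? price (s + 1)).getD 0) :=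
          pvGet_some price (s + 1) (by omega) (by omega)
        rw [pvA_loop, dif_pos hend, show s + 1 - 1 = s by omega, ga, gb]
        by_cases hc : pvR price s
        · have hc' : (PySem.List.pyGet? price s).getD 0 < (PySem.List.pyGet? price (s + 1)).getD 0 := hc
          simp only [hc', if_pos]
          have h2' := ih.2 s (s + 2) ans h0 (by omega) (by omega) hfresh
            (by intro j hj1 hj2; rw [show j = s by omega]; exact hc) (by omega)
          rw [show (s + 1 + 1 : Int) = s + 2 by ring, h2', show s + 2 - 1 = s + 1 by omega]
          simp only [pvBuysFrom]
          rw [pvFilt_cons (pvBuyP price) s (n - 1) (by omega)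
            ((pvBuyP_iff price s).mpr ⟨hc, hfresh⟩)]
        · have hc' : ¬ ((PySem.List.pyGet? price s).getD 0 < (PySem.List.pyGet? price (s + 1)).getD 0) := hc
          simp only [if_neg hc']
          rw [if_neg (by omega : ¬ s ≠ s)]
          have h1' := ih.1 (s + 1) ans (by omega) (by omega)
            (Or.inr (by rw [show s + 1 - 1 = s by omega]; exact hc)) (by omega)
          rw [h1']
          simp only [pvBuysFrom]
          rw [pvFilt_skip (pvBuyP price) s (n - 1) (by omega)
            (pvBuyP_false price s (by tauto))]
          have hsf : pvSellsFrom price n (s + 1) = pvSellsFrom price n (s + 1 + 1) := by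
            simp only [pvSellsFrom]
            rw [pvFilt_skip (pvSellP price n) (s + 1) n (by omega)
              (pvSellP_false price n (s + 1)
                (by rw [show s + 1 - 1 = s by omega]; tauto))]
          rw [hsf]
      · exact pvFresh_exit price n s ans (by omega)
    · -- CLIMBING state
      intro s i ans h0 h1 h2 hfresh hrise hk
      by_cases hend : i < n
      · have ga : PySem.List.pyGet? price (i - 1) = some ((PySem.List.pyGet? price (i - 1)).getD 0) :=
          pvGet_some price (i - 1) (by omega) (by omega)
        have gb : PySem.List.pyGet? price i = some ((PySem.List.pyGet? price i).getD 0) :=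
          pvGet_some price i (by omega) (by omega)
        rw [pvA_loop, dif_pos hend, ga, gb]
        have hRiff : pvR price (i - 1) ↔
            (PySem.List.pyGet? price (i - 1)).getD 0 < (PySem.List.pyGet? price i).getD 0 := by
          unfold pvR pvG; rw [show i - 1 + 1 = i by omega]
        by_cases hc : pvR price (i - 1)
        · simp only [hRiff.mp hc, if_pos]
          have h2' := ih.2 s (i + 1) ans h0 (by omega) (by omega) hfresh
            (by intro j hj1 hj2
                by_cases hj : j = i - 1
                · rw [hj]; exact hc
                · exact hrise j hj1 (by omega)) (by omega)
          rw [h2', show i + 1 - 1 = i by omega]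
          have hbuys : pvBuysFrom price n (i - 1) = pvBuysFrom price n i := by
            simp only [pvBuysFrom]
            rw [pvFilt_skip (pvBuyP price) (i - 1) (n - 1) (by omega)
              (pvBuyP_false price (i - 1) (by
                rintro ⟨-, h | h⟩
                · omega
                · exact h (by rw [show i - 1 - 1 = i - 2 by omega]; exact hrise (i - 2) (by omega) (by omega))))]
            rw [show i - 1 + 1 = i by omega]
          have hsells : pvSellsFrom price n (i - 1) = pvSellsFrom price n i := by
            simp only [pvSellsFrom]
            rw [pvFilt_skip (pvSellP price n) (i - 1) n (by omega)
              (pvSellP_false price n (i - 1) (by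
                rw [show i - 1 - 1 = i - 2 by omega]
                rintro ⟨-, h | h⟩
                · omega
                · exact h hc))]
            rw [show i - 1 + 1 = i by omega]
          rw [hbuys, hsells]
        · simp only [if_neg (fun hx => hc (hRiff.mpr hx))]
          rw [if_pos (by omega : s ≠ i - 1)]
          have h1' := ih.1 i (ans ++ [(s, i - 1)]) (by omega) (by omega)
            (Or.inr hc) (by omega)
          rw [h1']
          have hbuys : pvBuysFrom price n (i - 1) = pvBuysFrom price n i := by
            simp only [pvBuysFrom]
            rw [pvFilt_skip (pvBuyP price) (i - 1) (n - 1) (by omega)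
              (pvBuyP_false price (i - 1) (by rintro ⟨h, -⟩; exact hc h))]
            rw [show i - 1 + 1 = i by omega]
          have hsells1 : pvSellsFrom price n (i - 1) = (i - 1) :: pvSellsFrom price n i := by
            simp only [pvSellsFrom]
            rw [pvFilt_cons (pvSellP price n) (i - 1) n (by omega)
              ((pvSellP_iff price n (i - 1)).mpr ⟨by
                  rw [show i - 1 - 1 = i - 2 by omega]
                  exact hrise (i - 2) (by omega) (by omega), Or.inr hc⟩)]
            rw [show i - 1 + 1 = i by omega]
          have hsells2 : pvSellsFrom price n i = pvSellsFrom price n (i + 1) := by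
            simp only [pvSellsFrom]
            rw [pvFilt_skip (pvSellP price n) i n (by omega)
              (pvSellP_false price n i (by rintro ⟨h, -⟩; exact hc h))]
          rw [hbuys, hsells1, ← hsells2, List.zip_cons_cons]
          simp
      · have hi : i = n := by omega
        rw [hi]
        exact pvClimb_exit price n s ans h0 (by omega) (fun j hj1 hj2 => hrise j hj1 (by omega))

-- ===== VERDICT (by name: the statement is the Claim_ definition above) =====
theorem find_stock_buy_sell_days_spec : Claim_equal_find_stock_buy_sell_days := by
  intro price n _hdom hpre
  unfold Spec_find_stock_buy_sell_days find_stock_buy_sell_days find_stock_buy_sell_days_alt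
  by_cases h2 : n < 2
  · rw [if_pos h2, if_pos h2]
  · rw [if_neg h2, if_neg h2]
    have hlen : n ≤ (price.length : Int) := by
      rcases hpre with h | h
      · omega
      · exact h
    have := (pvMain price n hlen (n - 1).toNat).1 0 [] (by omega) (by omega) (Or.inl rfl) (by omega)
    simpa [pvBuysFrom, pvSellsFrom] using this
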